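-- pv_equiv track=rewrite | github.com/paras-rathod/Machine-Learning-Based-Phishing-Website-Detection-System | models/ext1.py | IPExist
-- ===== SOURCE A (Python) =====
-- def IPExist(words):
--     count = 0;
--     for element in words:
--         if str(element).isnumeric():
--             count += 1
--         else:
--             if count >= 4:
--                 return 1
--             else:
--                 count = 0;
--     if count >= 4:
--         return 1
--     return 0
-- ===== SOURCE B (Python) =====
-- def IPExist(words):
--     flags = [str(w).isnumeric() for w in words]
--     return 1 if any(all(flags[i:i + 4]) for i in range(len(flags) - 3)) else 0
-- ===== Notes on version B (the rewrite author's own statement) =====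
-- stated objective: alternative
-- what changed: Replaces A's stateful run-counter with reset and mid-loop early return by precomputing a numeric-flag list and testing every window of 4 consecutive positions with any/all: a run of 4+ numeric words exists iff some window of 4 consecutive words is all numeric.
import Mathlib
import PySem

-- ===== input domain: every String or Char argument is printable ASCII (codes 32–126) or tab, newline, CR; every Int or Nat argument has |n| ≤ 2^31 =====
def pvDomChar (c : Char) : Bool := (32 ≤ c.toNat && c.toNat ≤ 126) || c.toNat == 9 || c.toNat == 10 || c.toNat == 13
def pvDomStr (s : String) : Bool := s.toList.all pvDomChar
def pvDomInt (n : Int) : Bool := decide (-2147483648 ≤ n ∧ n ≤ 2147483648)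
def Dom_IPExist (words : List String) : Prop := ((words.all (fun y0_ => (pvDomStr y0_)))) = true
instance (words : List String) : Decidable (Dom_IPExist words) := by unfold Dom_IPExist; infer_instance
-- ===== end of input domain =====

-- B replaces A's stateful run-counter loop by a recursive sliding-window check (alternative decomposition, same asymptotic cost).
-- str.isnumeric is ported as PySem.Str.strIsdigit: on the printable-ASCII domain the two Python predicates coincide.

-- ===== PORT A =====
-- the for-loop of A, with its early return: state is the running count
def IPExistGo : List String → Int → Int
  | [], count => if count ≥ 4 then 1 else 0
  | w :: ws, count =>
    if PySem.Str.strIsdigit w then IPExistGo ws (count + 1)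
    else if count ≥ 4 then 1 else IPExistGo ws 0

def IPExist (words : List String) : Int := IPExistGo words 0

-- ===== PORT B =====
def IPExist_alt (words : List String) : Int :=
  let flags := words.map (fun w => PySem.Str.strIsdigit w)
  if (PySem.List.pyRange 0 ((flags.length : Int) - 3) 1).any
      (fun i => (PySem.List.slice flags (some i) (some (i + 4))).all (fun b => b)) then 1
  else 0

-- ===== PRECONDITION & SPEC =====
def Spec_IPExist (words : List String) (out : Int) : Prop := out = IPExist_alt words
instance (words : List String) (out : Int) : Decidable (Spec_IPExist words out) := by unfold Spec_IPExist; infer_instance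

-- ===== CLAIM (what is proved, stated in full; the proofs are below) =====
def Claim_equal_IPExist : Prop := ∀ (words : List String), Dom_IPExist words → Spec_IPExist words (IPExist words)

-- ===== LEMMAS AND PROOFS =====

-- first k elements exist and are all numeric
def prefixRun : List String → Nat → Bool
  | _, 0 => true
  | [], _ + 1 => false
  | w :: ws, k + 1 => PySem.Str.strIsdigit w && prefixRun ws k

-- some window of 4 consecutive numeric words exists
def exists4 : List String → Bool
  | [] => false
  | w :: ws => prefixRun (w :: ws) 4 || exists4 ws

theorem prefixRun_mono (ws : List String) (k k' : Nat) (h : k ≤ k')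
    (hp : prefixRun ws k' = true) : prefixRun ws k = true := by
  induction ws generalizing k k' with
  | nil => cases k with
    | zero => rfl
    | succ n => cases k' with
      | zero => omega
      | succ m => simp [prefixRun] at hp
  | cons w ws ih =>
    cases k with
    | zero => rfl
    | succ n => cases k' with
      | zero => omega
      | succ m =>
        simp [prefixRun] at hp ⊢
        exact ⟨hp.1, ih n m (by omega) hp.2⟩

theorem prefixRun_eq (ws : List String) (k : Nat) :
    prefixRun ws k = (decide (k ≤ ws.length) && (ws.take k).all (fun w => PySem.Str.strIsdigit w)) := by
  induction ws generalizing k with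
  | nil => cases k with
    | zero => rfl
    | succ n => rfl
  | cons w t ih =>
    cases k with
    | zero => rfl
    | succ n =>
      simp only [prefixRun, ih, List.take_succ_cons, List.all_cons, List.length_cons]
      by_cases h : n ≤ t.length
      · simp [h]
      · simp [h, show ¬ n + 1 ≤ t.length + 1 by omega]

theorem exists4_absorb (ws : List String) :
    (prefixRun ws 4 || exists4 ws) = exists4 ws := by
  cases ws with
  | nil => simp [prefixRun]
  | cons w t => simp [exists4]
    -- (prefixRun (w::t) 4 || (prefixRun (w::t) 4 || exists4 t))

theorem IPExistGo_of_ge (ws : List String) (count : Int) (h : 4 ≤ count) :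
    IPExistGo ws count = 1 := by
  induction ws generalizing count with
  | nil => simp only [IPExistGo, if_pos h]
  | cons w t ih =>
    simp only [IPExistGo]
    split
    · exact ih (count + 1) (by omega)
    · rfl

theorem IPExistGo_eq (ws : List String) (count : Int) (h0 : 0 ≤ count) (h4 : count < 4) :
    IPExistGo ws count =
      if (prefixRun ws (4 - count).toNat || exists4 ws) = true then 1 else 0 := by
  induction ws generalizing count with
  | nil =>
    have : prefixRun [] (4 - count).toNat = false := by
      have : (4 - count).toNat = ((4 - count).toNat - 1) + 1 := by omega
      rw [this]; rfl
    simp [IPExistGo, exists4, this, show ¬ (4:Int) ≤ count by omega]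
  | cons w t ih =>
    by_cases hw : PySem.Str.strIsdigit w = true
    · -- numeric head
      by_cases hc : count + 1 < 4
      · rw [show IPExistGo (w :: t) count = IPExistGo t (count + 1) by rw [IPExistGo, if_pos hw],
            ih (count + 1) (by omega) hc]
        have hpr : prefixRun (w :: t) (4 - count).toNat
            = (PySem.Str.strIsdigit w && prefixRun t (4 - (count + 1)).toNat) := by
          have h1 : (4 - count).toNat = (4 - (count + 1)).toNat + 1 := by omega
          rw [h1]; rfl
        have habs : exists4 (w :: t) = (prefixRun (w :: t) 4 || exists4 t) := by
          simp [exists4]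
        congr 1
        rw [hpr, habs, hw, Bool.true_and]
        by_cases hp4 : prefixRun (w :: t) 4 = true
        · -- then prefixRun t 3 holds hence prefixRun t (4-(count+1)).toNat holds
          have h3 : prefixRun t 3 = true := by
            have : prefixRun (w :: t) 4 = (PySem.Str.strIsdigit w && prefixRun t 3) := rfl
            rw [this, hw, Bool.true_and] at hp4; exact hp4
          have : prefixRun t (4 - (count + 1)).toNat = true :=
            prefixRun_mono t _ 3 (by omega) h3
          simp [this]
        · simp [Bool.eq_false_iff.mpr hp4]
      · -- count + 1 = 4: both sides are 1
        have hc4 : count = 3 := by omega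
        rw [show IPExistGo (w :: t) count = IPExistGo t (count + 1) by rw [IPExistGo, if_pos hw],
            IPExistGo_of_ge t (count + 1) (by omega)]
        have : prefixRun (w :: t) (4 - count).toNat = true := by
          subst hc4
          show prefixRun (w :: t) 1 = true
          simp only [prefixRun, hw, Bool.true_and]
        simp [this]
    · -- non-numeric head: reset
      have hw' : PySem.Str.strIsdigit w = false := Bool.eq_false_iff.mpr hw
      rw [show IPExistGo (w :: t) count = IPExistGo t 0 by
            rw [IPExistGo, if_neg (by rw [hw']; exact Bool.false_ne_true), if_neg (by omega)],
          ih 0 (by norm_num) (by norm_num)]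
      have hpr : prefixRun (w :: t) (4 - count).toNat = false := by
        have h1 : (4 - count).toNat = ((4 - count).toNat - 1) + 1 := by omega
        rw [h1]; simp only [prefixRun, hw', Bool.false_and]
      have hp4 : prefixRun (w :: t) 4 = false := by
        simp only [prefixRun, hw', Bool.false_and]
      simp [exists4, hpr, hp4, exists4_absorb]

theorem exists4_iff (ws : List String) :
    exists4 ws = true ↔
      ∃ k : Nat, k + 4 ≤ ws.length ∧
        ((ws.drop k).take 4).all (fun w => PySem.Str.strIsdigit w) = true := by
  induction ws with
  | nil =>
    simp only [exists4, List.length_nil]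
    constructor
    · intro h; cases h
    · rintro ⟨k, hk, -⟩; omega
  | cons w t ih =>
    simp only [exists4, Bool.or_eq_true, prefixRun_eq, Bool.and_eq_true, decide_eq_true_eq, ih]
    constructor
    · rintro (⟨hlen, hall⟩ | ⟨k, hk, hall⟩)
      · exact ⟨0, by simpa using hlen, by simpa using hall⟩
      · exact ⟨k + 1, by simp only [List.length_cons]; omega, by simpa using hall⟩
    · rintro ⟨k, hk, hall⟩
      cases k with
      | zero => exact Or.inl ⟨by simpa using hk, by simpa using hall⟩
      | succ m =>
        exact Or.inr ⟨m, by simp only [List.length_cons] at hk; omega, by simpa using hall⟩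

theorem IPExist_alt_eq (ws : List String) :
    IPExist_alt ws = if exists4 ws = true then 1 else 0 := by
  have hslice : ∀ k : Nat,
      PySem.List.slice (ws.map (fun w => PySem.Str.strIsdigit w)) (some (k : Int)) (some ((k : Int) + 4))
        = ((ws.drop k).take 4).map (fun w => PySem.Str.strIsdigit w) := by
    intro k
    have h := PySem.List.slice_natCast_add (ws.map (fun w => PySem.Str.strIsdigit w)) k 4
    simp only [Nat.cast_ofNat] at h
    rw [h, ← List.map_drop, ← List.map_take]
  have hcond : (PySem.List.pyRange 0 (((ws.map (fun w => PySem.Str.strIsdigit w)).length : Int) - 3) 1).any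
      (fun i => (PySem.List.slice (ws.map (fun w => PySem.Str.strIsdigit w)) (some i) (some (i + 4))).all (fun b => b))
      = exists4 ws := by
    rw [Bool.eq_iff_iff]
    simp only [List.any_eq_true, PySem.List.mem_pyRange_one, List.length_map]
    rw [exists4_iff]
    constructor
    · rintro ⟨i, ⟨hi0, hi⟩, hall⟩
      refine ⟨i.toNat, by omega, ?_⟩
      rw [show i = ((i.toNat : Nat) : Int) by omega, hslice, List.all_map] at hall
      simpa using hall
    · rintro ⟨k, hk, hall⟩
      refine ⟨(k : Int), ⟨by omega, by omega⟩, ?_⟩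
      rw [hslice, List.all_map]
      simpa using hall
  show (if (PySem.List.pyRange 0 (((ws.map (fun w => PySem.Str.strIsdigit w)).length : Int) - 3) 1).any
      (fun i => (PySem.List.slice (ws.map (fun w => PySem.Str.strIsdigit w)) (some i) (some (i + 4))).all (fun b => b)) = true
    then (1 : Int) else 0) = _
  rw [hcond]

-- ===== VERDICT (by name: the statement is the Claim_ definition above) =====
theorem IPExist_spec : Claim_equal_IPExist := by
  intro words _
  unfold Spec_IPExist IPExist
  rw [IPExistGo_eq words 0 (by norm_num) (by norm_num), IPExist_alt_eq,
      show ((4:Int) - 0).toNat = 4 from rfl, exists4_absorb words]
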